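-- pv_equiv track=rewrite | github.com/JedSchales/PythonInstituteExamples | Simple_Anagram_Checker.py | nonAlphaStripper
-- ===== SOURCE A (Python) =====
-- def nonAlphaStripper(text):
--     processedText = ''
--     for ltr in text:
--         if (ord(ltr) >= 97 and ord(ltr) <= 122) or (ord(ltr) >= 65 and ord(ltr) <= 90):
--             processedText += ltr
--         else:
--             continue
--     return processedText.upper()
-- ===== SOURCE B (Python) =====
-- import re
--
-- def nonAlphaStripper(text):
--     return re.sub('[^A-Za-z]', '', text).upper()
-- ===== Notes on version B (the rewrite author's own statement) =====
-- stated objective: idiomatic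
-- what changed: Replaces the explicit per-character loop with ord-range branches and repeated string concatenation by a single regex substitution deleting every non-ASCII-letter character, followed by uppercasing.
import Mathlib
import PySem

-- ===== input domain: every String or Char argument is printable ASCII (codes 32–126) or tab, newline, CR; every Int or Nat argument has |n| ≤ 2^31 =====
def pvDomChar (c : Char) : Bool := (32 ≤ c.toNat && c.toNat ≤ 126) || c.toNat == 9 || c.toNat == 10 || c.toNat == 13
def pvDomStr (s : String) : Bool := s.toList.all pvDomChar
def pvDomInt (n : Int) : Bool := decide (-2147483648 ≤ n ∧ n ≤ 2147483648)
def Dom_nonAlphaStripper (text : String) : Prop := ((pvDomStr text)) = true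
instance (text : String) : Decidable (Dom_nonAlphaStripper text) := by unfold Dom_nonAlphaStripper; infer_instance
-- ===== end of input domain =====

-- B replaces A's explicit per-character loop (ord-range branches + string concatenation)
-- with a regex substitution re.sub('[^A-Za-z]','',text) followed by .upper() (objective: idiomatic).


-- ===== PORT A =====
-- loop over the characters, appending a letter (by ord range) to the accumulator, then .upper()
def nonAlphaStripper (text : String) : String :=
  let processedText :=
    text.toList.foldl
      (fun acc ltr =>
        if (97 ≤ ltr.toNat ∧ ltr.toNat ≤ 122) ∨ (65 ≤ ltr.toNat ∧ ltr.toNat ≤ 90)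
        then acc ++ [ltr] else acc) []
  PySem.Str.upper (String.mk processedText)

-- ===== PORT B =====
-- re.sub('[^A-Za-z]', '', text): deleting every char outside the class [A-Za-z] is ported
-- exactly as a filter keeping the chars whose code is in the class; then .upper()
def pvClassAZaz (c : Char) : Bool :=
  decide ((65 ≤ c.toNat ∧ c.toNat ≤ 90) ∨ (97 ≤ c.toNat ∧ c.toNat ≤ 122))

def nonAlphaStripper_alt (text : String) : String :=
  PySem.Str.upper (String.mk (text.toList.filter pvClassAZaz))

-- ===== PRECONDITION & SPEC =====
def Spec_nonAlphaStripper (text : String) (out : String) : Prop := out = nonAlphaStripper_alt text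
instance (text : String) (out : String) : Decidable (Spec_nonAlphaStripper text out) := by unfold Spec_nonAlphaStripper; infer_instance

-- ===== CLAIM (what is proved, stated in full; the proofs are below) =====
def Claim_equal_nonAlphaStripper : Prop := ∀ (text : String), Dom_nonAlphaStripper text → Spec_nonAlphaStripper text (nonAlphaStripper text)

-- ===== LEMMAS AND PROOFS =====
lemma pvFoldlAppendFilter (p : Char → Prop) [DecidablePred p] :
    ∀ (l acc : List Char),
      l.foldl (fun a c => if p c then a ++ [c] else a) acc = acc ++ l.filter (fun c => decide (p c)) := by
  intro l
  induction l with
  | nil => simp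
  | cons c t ih =>
      intro acc
      by_cases h : p c <;> simp [List.foldl, h, ih]

-- ===== VERDICT (by name: the statement is the Claim_ definition above) =====
theorem nonAlphaStripper_spec : Claim_equal_nonAlphaStripper := by
  intro text _
  unfold Spec_nonAlphaStripper nonAlphaStripper nonAlphaStripper_alt
  rw [pvFoldlAppendFilter]
  simp only [List.nil_append]
  congr 2
  apply List.filter_congr
  intro c _
  simp [pvClassAZaz, Bool.or_comm]
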